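-- pv_equiv track=rewrite | github.com/cigar666/my_manim_projects | my_projects/Pascal_triangle.py | comb_factor_num
-- ===== SOURCE A (Python) =====
-- def factor_num(n, m):
--     # n = s * m ** t, to get maximum t
--     num = 0
--     while n % m == 0:
--         n = int(n/m)
--         num += 1
--     return num
--
-- def get_prime_factor(n):
--
--     prime_factor = {}
--     while n>1:
--         for i in range(2, n+1):
--             if n%i==0:
--                 n=int(n/i)
--
--                 if i in prime_factor.keys():
--                     prime_factor[i] += 1
--                 else:
--                     prime_factor[i] = 1
--
--                 break
--
--     return prime_factor
--
-- def factorial_factor_num_(n, m):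
--     # (n!) = s * m ** t, to get maximum t
--     # here m mast be prime number
--     num = 0
--     for i in range(1, n+1):
--         num += factor_num(i, m)
--     return num
--
-- def factorial_factor_num(n, m):
--     # (n!) = sum(p_i ^ k_i)
--     # m = sum(pm_i ^ km_i)
--     # so (n!) = s * sum(pm_i ^ t_i)
--     # to get the dict with key of pm_i and value of t_i
--     prime_factor = get_prime_factor(m)
--     prime_f_02 = {}
--     for key in prime_factor:
--         prime_f_02[key] = factorial_factor_num_(n, key)
--     return prime_f_02
--
-- def comb_factor_num(n, k, m):
--     # comb(n, k) = s * m ** t, to get maximum t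
--     prime_factor = get_prime_factor(m)
--     p_01 = factorial_factor_num(n, m)
--     p_02 = factorial_factor_num(k, m)
--     p_03 = factorial_factor_num(n-k, m)
--     p = {}
--     for key in p_01:
--         p[key] = p_01[key] - p_02[key] - p_03[key]
--     return min([int(p[key]/prime_factor[key]) for key in prime_factor])
-- ===== SOURCE B (Python) =====
-- def comb_factor_num(n, k, m):
--     # exponent t with comb(n, k) = s * m ** t, via Legendre's formula
--     # applied to each prime factor of m (trial division up to sqrt(m)).
--     factors = []
--     d, mm = 2, m
--     while d * d <= mm:
--         if mm % d == 0:
--             e = 0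
--             while mm % d == 0:
--                 mm //= d
--                 e += 1
--             factors.append((d, e))
--         d += 1
--     if mm > 1:
--         factors.append((mm, 1))
--
--     def legendre(x, p):
--         # exponent of p in x!, i.e. sum of x // p**j; 0 when x < p
--         total, q = 0, p
--         while q <= x:
--             total += x // q
--             q *= p
--         return total
--
--     return min(int((legendre(n, p) - legendre(k, p) - legendre(n - k, p)) / e)
--                for (p, e) in factors)
-- ===== Notes on version B (the rewrite author's own statement) =====
-- stated objective: faster
-- what changed: Replaces the per-integer factor-counting over range(1,n+1) for each prime (and the O(m) smallest-divisor factorisation of m) by Legendre's formula sum(x//p**j) per prime factor of m, with m factorised by trial division up to sqrt(m).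
import Mathlib
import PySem

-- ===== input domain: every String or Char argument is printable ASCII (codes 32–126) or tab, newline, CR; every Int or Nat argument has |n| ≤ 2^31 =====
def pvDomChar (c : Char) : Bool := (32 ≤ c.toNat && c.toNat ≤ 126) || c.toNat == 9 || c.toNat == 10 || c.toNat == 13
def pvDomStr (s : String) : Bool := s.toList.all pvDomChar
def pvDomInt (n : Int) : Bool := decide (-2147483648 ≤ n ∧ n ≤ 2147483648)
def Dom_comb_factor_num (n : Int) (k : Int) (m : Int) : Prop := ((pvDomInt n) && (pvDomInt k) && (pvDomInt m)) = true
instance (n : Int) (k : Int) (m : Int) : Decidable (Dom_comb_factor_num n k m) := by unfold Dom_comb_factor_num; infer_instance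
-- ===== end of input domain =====

-- B replaces A's per-integer factor counting over range(1, n+1) (and A's O(m) smallest-divisor
-- factorisation of m) by Legendre's formula and trial division up to sqrt(m); equal on Pre_ (2 ≤ m).

-- ===== PORT A =====
-- factor_num: `while n % m == 0: n = int(n/m); num += 1`.  The loop is reachable only with
-- m ≥ 2, n ≥ 1, where fuel = |n| bounds the iteration count; int(n/m) is exact there (m ∣ n,
-- values < 2^53 on Dom): PySem.Int.truncdiv.
def pvFactorNum : Nat → Int → Int → Int
  | 0, _, _ => 0
  | fuel+1, n, m =>
    if PySem.Int.mod n m = 0 then pvFactorNum fuel (PySem.Int.truncdiv n m) m + 1 else 0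

-- the inner `for i in range(2, n+1): if n%i==0: … break` of get_prime_factor: first divisor
def pvGpfStep (n : Int) : Option Int :=
  (PySem.List.pyRange 2 (n+1)).find? (fun i => PySem.Int.mod n i == 0)

-- get_prime_factor's `while n>1` loop; fuel = n.toNat bounds the number of divisions.
-- The `none` branch is unreachable for n > 1 (i = n divides n; Python would loop forever).
def pvGpf : Nat → Int → PySem.Dict Int Int → PySem.Dict Int Int
  | 0, _, d => d
  | fuel+1, n, d =>
    if 1 < n then
      match pvGpfStep n with
      | some i => pvGpf fuel (PySem.Int.truncdiv n i) (d.modify i 0 (· + 1))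
      | none => d
    else d

def pvGetPrimeFactor (n : Int) : PySem.Dict Int Int := pvGpf n.toNat n PySem.Dict.empty

def pvFactorialFactorNum_ (n m : Int) : Int :=
  (PySem.List.pyRange 1 (n+1)).foldl (fun acc i => acc + pvFactorNum i.natAbs i m) 0

def pvFactorialFactorNum (n m : Int) : PySem.Dict Int Int :=
  let pf := pvGetPrimeFactor m
  pf.keys.foldl (fun d key => d.insert key (pvFactorialFactorNum_ n key)) PySem.Dict.empty

-- dict subscripts p_01[key] … are ported as getD _ 0: every accessed key is present there.
-- min([]) raises ValueError (m ≤ 1): that case is excluded by Pre_; the `none` arm returns 0.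
def comb_factor_num (n : Int) (k : Int) (m : Int) : Int :=
  let pf := pvGetPrimeFactor m
  let p01 := pvFactorialFactorNum n m
  let p02 := pvFactorialFactorNum k m
  let p03 := pvFactorialFactorNum (n-k) m
  let p := p01.keys.foldl
    (fun d key => d.insert key (p01.getD key 0 - p02.getD key 0 - p03.getD key 0))
    PySem.Dict.empty
  match PySem.List.min?
      (pf.keys.map (fun key => PySem.Int.truncdiv (p.getD key 0) (pf.getD key 0)))
      (fun x => x) with
  | some v => v
  | none => 0

-- ===== PORT B =====
-- inner `while mm % d == 0: mm //= d; e += 1` of Source B; fuel = |mm| bounds the divisions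
def pvExtract : Nat → Int → Int → Int × Int
  | 0, mm, _ => (mm, 0)
  | fuel+1, mm, d =>
    if PySem.Int.mod mm d = 0 then
      let r := pvExtract fuel (PySem.Int.floordiv mm d) d
      (r.1, r.2 + 1)
    else (mm, 0)

-- outer `while d * d <= mm` trial-division loop; returns (final mm, factors so far)
def pvFacLoop : Nat → Int → Int → List (Int × Int) → Int × List (Int × Int)
  | 0, _, mm, acc => (mm, acc)
  | fuel+1, d, mm, acc =>
    if d * d ≤ mm then
      if PySem.Int.mod mm d = 0 then
        let r := pvExtract mm.natAbs mm d
        pvFacLoop fuel (d+1) r.1 (acc ++ [(d, r.2)])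
      else pvFacLoop fuel (d+1) mm acc
    else (mm, acc)

def pvFactorize (m : Int) : List (Int × Int) :=
  let r := pvFacLoop m.natAbs 2 m []
  if 1 < r.1 then r.2 ++ [(r.1, 1)] else r.2

-- `while q <= x: total += x // q; q *= p`; fuel = x.toNat + 1 bounds the iterations
def pvLegLoop : Nat → Int → Int → Int → Int
  | 0, _, _, _ => 0
  | fuel+1, x, p, q =>
    if q ≤ x then PySem.Int.floordiv x q + pvLegLoop fuel x p (q * p) else 0

def pvLegendre (x p : Int) : Int := pvLegLoop (x.toNat + 1) x p p

-- min of an empty generator (m ≤ 1) raises ValueError in Source B too: excluded by Pre_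
def comb_factor_num_alt (n : Int) (k : Int) (m : Int) : Int :=
  match PySem.List.min?
      ((pvFactorize m).map (fun pe =>
        PySem.Int.truncdiv (pvLegendre n pe.1 - pvLegendre k pe.1 - pvLegendre (n-k) pe.1) pe.2))
      (fun x => x) with
  | some v => v
  | none => 0

-- ===== PRECONDITION & SPEC =====
-- For m ≤ 1 both Pythons raise: get_prime_factor gives no prime, so A's min([]) is a ValueError
-- (and B's min over an empty generator likewise); Pre_ excludes exactly those inputs.
def Pre_comb_factor_num (n : Int) (k : Int) (m : Int) : Prop := 2 ≤ m
instance (n : Int) (k : Int) (m : Int) : Decidable (Pre_comb_factor_num n k m) := by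
  unfold Pre_comb_factor_num; infer_instance

def pvWitness_comb_factor_num : Int × Int × Int := (7, 3, 6)

def Spec_comb_factor_num (n : Int) (k : Int) (m : Int) (out : Int) : Prop :=
  out = comb_factor_num_alt n k m
instance (n : Int) (k : Int) (m : Int) (out : Int) : Decidable (Spec_comb_factor_num n k m out) := by
  unfold Spec_comb_factor_num; infer_instance

-- ===== CLAIM (what is proved, stated in full; the proofs are below) =====
def Claim_equal_comb_factor_num : Prop :=
  ∀ (n : Int) (k : Int) (m : Int), Dom_comb_factor_num n k m →
    Pre_comb_factor_num n k m → Spec_comb_factor_num n k m (comb_factor_num n k m)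

-- ===== LEMMAS AND PROOFS =====

-- exponent of p in i (Python's factor_num on the reachable inputs), as a Nat function
def pvNu (n p : Nat) : Nat :=
  if h : 2 ≤ p ∧ p ∣ n ∧ n ≠ 0 then pvNu (n / p) p + 1 else 0
termination_by n
decreasing_by exact Nat.div_lt_self (Nat.pos_of_ne_zero h.2.2) (by omega)

-- the list of smallest prime divisors repeatedly divided out (A's division order)
def pvListFac (n : Nat) : List Nat :=
  if h : 2 ≤ n then n.minFac :: pvListFac (n / n.minFac) else []
termination_by n
decreasing_by exact Nat.div_lt_self (by omega) (Nat.minFac_prime (by omega)).two_le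

-- the grouped factorisation (B's trial-division output)
def pvFacN (n : Nat) : List (Nat × Nat) :=
  if h : 2 ≤ n then
    (n.minFac, pvNu n n.minFac) :: pvFacN (n / n.minFac ^ pvNu n n.minFac)
  else []
termination_by n
decreasing_by
  have h2 : 2 ≤ n.minFac := (Nat.minFac_prime (by omega)).two_le
  have hnu : 1 ≤ pvNu n n.minFac := by
    rw [pvNu, dif_pos ⟨h2, n.minFac_dvd, by omega⟩]; omega
  refine Nat.div_lt_self (by omega) ?_
  calc 1 < 2 := by omega
    _ ≤ n.minFac ^ 1 := by simpa using h2
    _ ≤ n.minFac ^ pvNu n n.minFac := Nat.pow_le_pow_right (by omega) hnu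

theorem pvNu_dvd {p : Nat} (hp : 2 ≤ p) : ∀ n : Nat, n ≠ 0 →
    p ^ pvNu n p ∣ n ∧ ¬ p ^ (pvNu n p + 1) ∣ n := by
  intro n
  induction n using Nat.strong_induction_on with
  | _ n ih =>
    intro hn
    rw [pvNu]
    by_cases h : p ∣ n
    · rw [dif_pos ⟨hp, h, hn⟩]
      have hpos : 0 < n := Nat.pos_of_ne_zero hn
      have hdivne : n / p ≠ 0 := by
        have := Nat.div_pos (Nat.le_of_dvd hpos h) (by omega); omega
      have hlt : n / p < n := Nat.div_lt_self hpos (by omega)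
      obtain ⟨h1, h2⟩ := ih (n / p) hlt hdivne
      have hne : n = p * (n / p) := (Nat.mul_div_cancel' h).symm
      constructor
      · calc p ^ (pvNu (n / p) p + 1) = p * p ^ pvNu (n / p) p := by ring
          _ ∣ p * (n / p) := mul_dvd_mul_left p h1
          _ = n := hne.symm
      · intro hcon
        apply h2
        have hcon' : p * p ^ (pvNu (n / p) p + 1) ∣ p * (n / p) := by
          calc p * p ^ (pvNu (n / p) p + 1) = p ^ (pvNu (n / p) p + 1 + 1) := by ring
            _ ∣ n := hcon
            _ = p * (n / p) := hne
        exact (mul_dvd_mul_iff_left (by omega : p ≠ 0)).1 hcon'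
    · rw [dif_neg (by tauto)]
      refine ⟨by simpa using one_dvd n, by simpa using h⟩

theorem pvNu_le_iff {n p : Nat} (hp : 2 ≤ p) (hn : n ≠ 0) (j : Nat) :
    p ^ j ∣ n ↔ j ≤ pvNu n p := by
  constructor
  · intro hd
    by_contra hlt
    push_neg at hlt
    exact (pvNu_dvd hp n hn).2 (dvd_trans (pow_dvd_pow p (by omega)) hd)
  · intro hle
    exact dvd_trans (pow_dvd_pow p hle) (pvNu_dvd hp n hn).1

theorem pvNu_lt_bound {n p J : Nat} (hp : 2 ≤ p) (hn : n ≠ 0) (h : n < p ^ J) :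
    pvNu n p < J := by
  have h2 : p ^ pvNu n p ≤ n := Nat.le_of_dvd (Nat.pos_of_ne_zero hn) (pvNu_dvd hp n hn).1
  exact (Nat.pow_lt_pow_iff_right (by omega : 1 < p)).1 (lt_of_le_of_lt h2 h)

theorem pvNu_card (i p J : Nat) (hp : 2 ≤ p) (hi : 1 ≤ i) (hiJ : i < p ^ J) :
    pvNu i p = ((Finset.Ico 1 J).filter (fun j => p ^ j ∣ i)).card := by
  have hne : i ≠ 0 := by omega
  have h1 : (Finset.Ico 1 J).filter (fun j => p ^ j ∣ i) = Finset.Icc 1 (pvNu i p) := by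
    ext j
    simp only [Finset.mem_filter, Finset.mem_Ico, Finset.mem_Icc]
    constructor
    · rintro ⟨⟨h1j, _⟩, hdvd⟩
      exact ⟨h1j, (pvNu_le_iff hp hne j).1 hdvd⟩
    · rintro ⟨h1j, hle⟩
      have hb := pvNu_lt_bound hp hne hiJ
      exact ⟨⟨h1j, by omega⟩, (pvNu_le_iff hp hne j).2 hle⟩
  rw [h1, Nat.card_Icc]
  omega

-- Legendre's identity, primality-free: Σ_{i=1}^N ν_p(i) = Σ_{j=1}^{J-1} ⌊N/p^j⌋
theorem pvLegendreIdentity (N p J : Nat) (hp : 2 ≤ p) (hNJ : N < p ^ J) :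
    (∑ i ∈ Finset.Icc 1 N, pvNu i p) = ∑ j ∈ Finset.Ico 1 J, N / p ^ j := by
  calc ∑ i ∈ Finset.Icc 1 N, pvNu i p
      = ∑ i ∈ Finset.Icc 1 N, ((Finset.Ico 1 J).filter (fun j => p ^ j ∣ i)).card := by
        refine Finset.sum_congr rfl ?_
        intro i hi
        simp only [Finset.mem_Icc] at hi
        exact pvNu_card i p J hp hi.1 (lt_of_le_of_lt hi.2 hNJ)
    _ = ∑ i ∈ Finset.Icc 1 N, ∑ j ∈ Finset.Ico 1 J, if p ^ j ∣ i then 1 else 0 := by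
        refine Finset.sum_congr rfl ?_
        intro i _
        rw [Finset.card_filter]
    _ = ∑ j ∈ Finset.Ico 1 J, ∑ i ∈ Finset.Icc 1 N, if p ^ j ∣ i then 1 else 0 := Finset.sum_comm
    _ = ∑ j ∈ Finset.Ico 1 J, N / p ^ j := by
        refine Finset.sum_congr rfl ?_
        intro j _
        rw [← Finset.card_filter]
        have hIcc : Finset.Icc 1 N = Finset.Ioc 0 N := by
          ext x; simp [Finset.mem_Icc, Finset.mem_Ioc]; omega
        rw [hIcc]
        exact Nat.Ioc_filter_dvd_card_eq_div N (p ^ j)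

-- ---- A-side bridges ----

theorem pvFactorNum_eq (fuel : Nat) : ∀ (i p : Nat), 2 ≤ p → 1 ≤ i → i ≤ fuel →
    pvFactorNum fuel (i : Int) (p : Int) = (pvNu i p : Int) := by
  induction fuel with
  | zero => intro i p _ _ _; omega
  | succ fuel ih =>
    intro i p hp hi hf
    simp only [pvFactorNum]
    by_cases h : p ∣ i
    · have hmod : PySem.Int.mod (i : Int) (p : Int) = 0 :=
        (PySem.Int.mod_eq_zero_iff_dvd _ _).2 (Int.natCast_dvd_natCast.2 h)
      rw [if_pos hmod]
      have htd : PySem.Int.truncdiv (i : Int) (p : Int) = ((i / p : Nat) : Int) := by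
        show ((i : Int).tdiv (p : Int)) = _
        rw [Int.tdiv_eq_ediv_of_nonneg (by positivity)]
        exact_mod_cast (Int.natCast_div i p).symm
      have hdp : 1 ≤ i / p := Nat.div_pos (Nat.le_of_dvd (by omega) h) (by omega)
      have hlt : i / p < i := Nat.div_lt_self (by omega) (by omega)
      have hnu : pvNu i p = pvNu (i / p) p + 1 := by
        rw [pvNu, dif_pos ⟨hp, h, by omega⟩]
      rw [htd, ih (i / p) p hp hdp (by omega), hnu]
      push_cast; ring
    · have hmod : ¬ PySem.Int.mod (i : Int) (p : Int) = 0 := by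
        rw [PySem.Int.mod_eq_zero_iff_dvd]
        exact fun hd => h (Int.natCast_dvd_natCast.1 hd)
      rw [if_neg hmod, pvNu, dif_neg (by tauto)]
      rfl

theorem pvRange_empty (a b : Int) (h : b ≤ a) : PySem.List.pyRange a b = [] := by
  simp [PySem.List.pyRange]
  omega

theorem pvFFN_eq_sum (N p : Nat) (hp : 2 ≤ p) :
    pvFactorialFactorNum_ (N : Int) (p : Int) = ((∑ i ∈ Finset.Icc 1 N, pvNu i p : Nat) : Int) := by
  induction N with
  | zero =>
    unfold pvFactorialFactorNum_
    rw [pvRange_empty 1 ((0 : Nat) + 1) (by norm_num)]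
    simp
  | succ N ih =>
    unfold pvFactorialFactorNum_ at ih ⊢
    have hsplit : PySem.List.pyRange 1 ((N + 1 : Nat) + 1) = PySem.List.pyRange 1 ((N : Int) + 1) ++ [((N + 1 : Nat) : Int)] := by
      have := PySem.List.pyRange_one_succ_right (a := 1) (b := ((N : Int) + 1)) (by omega)
      push_cast
      push_cast at this
      convert this using 2 <;> ring
    rw [hsplit, List.foldl_append, ih]
    simp only [List.foldl_cons, List.foldl_nil]
    have hna : ((N + 1 : Nat) : Int).natAbs = N + 1 := Int.natAbs_natCast _
    rw [hna, pvFactorNum_eq (N + 1) (N + 1) p hp (by omega) le_rfl]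
    rw [Finset.sum_Icc_succ_top (by omega : 1 ≤ N + 1)]
    push_cast; ring

theorem pvFFN_nonpos (x m : Int) (hx : x ≤ 0) : pvFactorialFactorNum_ x m = 0 := by
  unfold pvFactorialFactorNum_
  rw [pvRange_empty 1 (x + 1) (by omega)]
  rfl

theorem pvFindMin_aux (n : Nat) (hn : 2 ≤ n) : ∀ (c j : Nat), 2 ≤ j → j ≤ n.minFac → n.minFac - j = c →
    (PySem.List.pyRange (j : Int) ((n : Int) + 1)).find? (fun i => PySem.Int.mod (n : Int) i == 0)
      = some ((n.minFac : Nat) : Int) := by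
  intro c
  induction c with
  | zero =>
    intro j hj hle hc
    have hj' : j = n.minFac := by omega
    have hjn : j ≤ n := by
      rw [hj']; exact Nat.le_of_dvd (by omega) n.minFac_dvd
    rw [PySem.List.pyRange_one_cons (by exact_mod_cast (by omega : (j : Int) < (n : Int) + 1))]
    rw [List.find?_cons_of_pos (by
      simp only [beq_iff_eq, PySem.Int.mod_eq_zero_iff_dvd, Int.natCast_dvd_natCast]
      simpa [hj'] using n.minFac_dvd)]
    rw [hj']
  | succ c ih =>
    intro j hj hle hc
    have hjlt : j < n.minFac := by omega
    have hmfn : n.minFac ≤ n := Nat.minFac_le (by omega)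
    rw [PySem.List.pyRange_one_cons (by exact_mod_cast (by omega : (j : Int) < (n : Int) + 1))]
    rw [List.find?_cons_of_neg]
    · have hstep : (j : Int) + 1 = ((j + 1 : Nat) : Int) := by push_cast; ring
      rw [hstep]
      exact ih (j + 1) (by omega) (by omega) (by omega)
    · have hnd : ¬ (j ∣ n) := fun hd => absurd (Nat.minFac_le_of_dvd hj hd) (by omega)
      simp only [beq_iff_eq, PySem.Int.mod_eq_zero_iff_dvd, Int.natCast_dvd_natCast]
      simpa using hnd

theorem pvGpfStep_eq (n : Nat) (hn : 2 ≤ n) : pvGpfStep (n : Int) = some ((n.minFac : Nat) : Int) := by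
  have h2 : 2 ≤ n.minFac := (Nat.minFac_prime (by omega)).two_le
  have := pvFindMin_aux n hn (n.minFac - 2) 2 le_rfl h2 rfl
  unfold pvGpfStep
  exact_mod_cast this

theorem pvGpf_eq (fuel : Nat) : ∀ (n : Nat), n ≤ fuel → ∀ (d : PySem.Dict Int Int),
    pvGpf fuel (n : Int) d
      = ((pvListFac n).map (fun q : Nat => (q : Int))).foldl (fun d p => d.modify p 0 (· + 1)) d := by
  induction fuel with
  | zero =>
    intro n hf d
    have : n = 0 := by omega
    subst this
    rw [pvListFac, dif_neg (by omega)]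
    rfl
  | succ fuel ih =>
    intro n hf d
    simp only [pvGpf]
    by_cases h2 : 2 ≤ n
    · rw [if_pos (by exact_mod_cast (by omega : (1 : Int) < (n : Int)))]
      rw [pvGpfStep_eq n h2]
      show pvGpf fuel (PySem.Int.truncdiv (n : Int) ((n.minFac : Nat) : Int))
          (d.modify ((n.minFac : Nat) : Int) 0 (· + 1)) = _
      have h2m : 2 ≤ n.minFac := (Nat.minFac_prime (by omega)).two_le
      have htd : PySem.Int.truncdiv (n : Int) ((n.minFac : Nat) : Int) = ((n / n.minFac : Nat) : Int) := by
        show ((n : Int).tdiv _) = _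
        rw [Int.tdiv_eq_ediv_of_nonneg (by positivity)]
        exact_mod_cast (Int.natCast_div n n.minFac).symm
      have hlt : n / n.minFac < n := Nat.div_lt_self (by omega) (by omega)
      have hl : pvListFac n = n.minFac :: pvListFac (n / n.minFac) := by
        rw [pvListFac]
        rw [dif_pos h2]
      rw [htd, ih (n / n.minFac) (by omega) _, hl]
      simp
    · rw [if_neg (by exact_mod_cast (by omega : ¬ (1 : Int) < (n : Int)))]
      rw [pvListFac, dif_neg h2]
      rfl

theorem pvGetPrimeFactor_eq (m : Nat) :
    pvGetPrimeFactor (m : Int) = PySem.Dict.counter ((pvListFac m).map (fun q : Nat => (q : Int))) := by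
  unfold pvGetPrimeFactor
  rw [Int.toNat_natCast, pvGpf_eq m m le_rfl PySem.Dict.empty, PySem.Dict.counter_eq_foldl]

-- ---- B-side bridges ----

theorem pvExtract_eq (fuel : Nat) : ∀ (mm d : Nat), 2 ≤ d → 1 ≤ mm → mm ≤ fuel →
    pvExtract fuel (mm : Int) (d : Int)
      = (((mm / d ^ pvNu mm d : Nat) : Int), (pvNu mm d : Int)) := by
  induction fuel with
  | zero => intro mm d _ _ _; omega
  | succ fuel ih =>
    intro mm d hd hm hf
    simp only [pvExtract]
    by_cases h : d ∣ mm
    · have hmod : PySem.Int.mod (mm : Int) (d : Int) = 0 :=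
        (PySem.Int.mod_eq_zero_iff_dvd _ _).2 (Int.natCast_dvd_natCast.2 h)
      rw [if_pos hmod]
      have hfd : PySem.Int.floordiv (mm : Int) (d : Int) = ((mm / d : Nat) : Int) := by
        rw [PySem.Int.floordiv_eq_ediv_of_pos (by positivity)]
        exact_mod_cast (Int.natCast_div mm d).symm
      have hdp : 1 ≤ mm / d := Nat.div_pos (Nat.le_of_dvd (by omega) h) (by omega)
      have hlt : mm / d < mm := Nat.div_lt_self (by omega) (by omega)
      rw [hfd, ih (mm / d) d hd hdp (by omega)]
      have hnu : pvNu mm d = pvNu (mm / d) d + 1 := by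
        rw [pvNu, dif_pos ⟨hd, h, by omega⟩]
      rw [hnu]
      have hq : mm / d / d ^ pvNu (mm / d) d = mm / d ^ (pvNu (mm / d) d + 1) := by
        rw [Nat.div_div_eq_div_mul, ← pow_succ']
      rw [hq]
      push_cast
      simp
    · have hmod : ¬ PySem.Int.mod (mm : Int) (d : Int) = 0 := by
        rw [PySem.Int.mod_eq_zero_iff_dvd]
        exact fun hdd => h (Int.natCast_dvd_natCast.1 hdd)
      rw [if_neg hmod]
      have hnu : pvNu mm d = 0 := by
        rw [pvNu, dif_neg (by tauto)]
      rw [hnu]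
      simp

theorem pvFacN_stop (mm d : Nat) (hd : 2 ≤ d) (hm : 1 ≤ mm)
    (hnd : ∀ q, 2 ≤ q → q < d → ¬ q ∣ mm) (hlt : mm < d ^ 2) :
    pvFacN mm = if 2 ≤ mm then [(mm, 1)] else [] := by
  by_cases h2 : 2 ≤ mm
  · rw [if_pos h2]
    have hpd : d ≤ mm.minFac := by
      by_contra hlt
      push_neg at hlt
      exact hnd mm.minFac (Nat.minFac_prime (by omega)).two_le hlt mm.minFac_dvd
    have hprime : mm.Prime := by
      by_contra hnp
      have hsq := Nat.minFac_sq_le_self (by omega) hnp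
      have : d ^ 2 ≤ mm.minFac ^ 2 := Nat.pow_le_pow_left hpd 2
      omega
    have hmf : mm.minFac = mm := hprime.minFac_eq
    have hnu : pvNu mm mm = 1 := by
      rw [pvNu, dif_pos ⟨h2, dvd_refl mm, by omega⟩, Nat.div_self (by omega : 0 < mm)]
      rw [pvNu, dif_neg (by
        rintro ⟨-, hd1, -⟩
        exact absurd (Nat.dvd_one.mp hd1) (by omega))]
    rw [pvFacN, dif_pos h2, hmf, hnu]
    rw [pow_one, Nat.div_self (by omega : 0 < mm)]
    rw [pvFacN, dif_neg (by omega)]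
  · rw [if_neg h2, pvFacN, dif_neg h2]

def pvFinish (r : Int × List (Int × Int)) : List (Int × Int) :=
  if 1 < r.1 then r.2 ++ [(r.1, 1)] else r.2

theorem pvFacLoop_eq (fuel : Nat) : ∀ (d mm : Nat) (acc : List (Int × Int)),
    2 ≤ d → 1 ≤ mm → (∀ q, 2 ≤ q → q < d → ¬ q ∣ mm) → mm < (d + fuel) ^ 2 →
    pvFinish (pvFacLoop fuel (d : Int) (mm : Int) acc)
      = acc ++ (pvFacN mm).map (fun pe : Nat × Nat => ((pe.1 : Int), (pe.2 : Int))) := by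
  induction fuel with
  | zero =>
    intro d mm acc hd hm hnd hb
    simp only [pvFacLoop, pvFinish]
    rw [pvFacN_stop mm d hd hm hnd (by simpa using hb)]
    by_cases h2 : 2 ≤ mm
    · rw [if_pos (by exact_mod_cast (by omega : (1 : Int) < (mm : Int))), if_pos h2]
      simp
    · rw [if_neg (by exact_mod_cast (by omega : ¬ (1 : Int) < (mm : Int))), if_neg h2]
      simp
  | succ fuel ih =>
    intro d mm acc hd hm hnd hb
    by_cases hdm : d * d ≤ mm
    · by_cases hdvd : d ∣ mm
      · have hmod : PySem.Int.mod (mm : Int) (d : Int) = 0 :=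
          (PySem.Int.mod_eq_zero_iff_dvd _ _).2 (Int.natCast_dvd_natCast.2 hdvd)
        have hna : ((mm : Int)).natAbs = mm := Int.natAbs_natCast _
        have hmm2 : 2 ≤ mm := by nlinarith
        have hnume : 1 ≤ pvNu mm d := (pvNu_le_iff hd (by omega) 1).1 (by simpa using hdvd)
        have hdvdpow : d ^ pvNu mm d ∣ mm := (pvNu_dvd hd mm (by omega)).1
        have hm' : 1 ≤ mm / d ^ pvNu mm d :=
          Nat.div_pos (Nat.le_of_dvd (by omega) hdvdpow) (by positivity)
        have hmf : mm.minFac = d := by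
          refine le_antisymm (Nat.minFac_le_of_dvd hd hdvd) ?_
          by_contra hlt
          push_neg at hlt
          exact hnd mm.minFac (Nat.minFac_prime (by omega)).two_le hlt mm.minFac_dvd
        have hnd' : ∀ q, 2 ≤ q → q < d + 1 → ¬ q ∣ mm / d ^ pvNu mm d := by
          intro q hq hlt hqd
          rcases Nat.lt_succ_iff_lt_or_eq.1 hlt with hcase | rfl
          · exact hnd q hq hcase (hqd.trans (Nat.div_dvd_of_dvd hdvdpow))
          · refine (pvNu_dvd hq mm (by omega)).2 ?_
            have h1 : q ^ pvNu mm q * q ∣ q ^ pvNu mm q * (mm / q ^ pvNu mm q) :=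
              mul_dvd_mul_left _ hqd
            rw [Nat.mul_div_cancel' hdvdpow] at h1
            calc q ^ (pvNu mm q + 1) = q ^ pvNu mm q * q := by ring
              _ ∣ mm := h1
        have hb' : mm / d ^ pvNu mm d < (d + 1 + fuel) ^ 2 := by
          have h1 : mm / d ^ pvNu mm d ≤ mm := Nat.div_le_self _ _
          have h2 : d + (fuel + 1) = d + 1 + fuel := by omega
          rw [← h2]
          exact lt_of_le_of_lt h1 hb
        have hcast : ((d : Int) + 1) = ((d + 1 : Nat) : Int) := by push_cast; ring
        have hstep : pvFacLoop (fuel + 1) (d : Int) (mm : Int) acc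
            = pvFacLoop fuel ((d + 1 : Nat) : Int) ((mm / d ^ pvNu mm d : Nat) : Int)
                (acc ++ [((d : Int), ((pvNu mm d : Nat) : Int))]) := by
          simp only [pvFacLoop]
          rw [if_pos (by exact_mod_cast hdm), if_pos hmod, hna,
            pvExtract_eq mm mm d hd hm le_rfl, hcast]
        rw [hstep, ih (d + 1) (mm / d ^ pvNu mm d) _ (by omega) hm' hnd' hb']
        have hfn : pvFacN mm = (d, pvNu mm d) :: pvFacN (mm / d ^ pvNu mm d) := by
          rw [pvFacN]
          rw [dif_pos (by omega : 2 ≤ mm), hmf]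
        rw [hfn]
        simp
      · have hmod : ¬ PySem.Int.mod (mm : Int) (d : Int) = 0 := by
          rw [PySem.Int.mod_eq_zero_iff_dvd]
          exact fun hdd => hdvd (Int.natCast_dvd_natCast.1 hdd)
        have hnd' : ∀ q, 2 ≤ q → q < d + 1 → ¬ q ∣ mm := by
          intro q hq hlt
          rcases Nat.lt_succ_iff_lt_or_eq.1 hlt with hcase | rfl
          · exact hnd q hq hcase
          · exact hdvd
        have hcast : ((d : Int) + 1) = ((d + 1 : Nat) : Int) := by push_cast; ring
        have hstep : pvFacLoop (fuel + 1) (d : Int) (mm : Int) acc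
            = pvFacLoop fuel ((d + 1 : Nat) : Int) (mm : Int) acc := by
          simp only [pvFacLoop]
          rw [if_pos (by exact_mod_cast hdm), if_neg hmod, hcast]
        rw [hstep, ih (d + 1) mm acc (by omega) hm hnd' (by
          have h2 : d + (fuel + 1) = d + 1 + fuel := by omega
          rw [← h2]
          exact hb)]
    · have hstep : pvFacLoop (fuel + 1) (d : Int) (mm : Int) acc = ((mm : Int), acc) := by
        simp only [pvFacLoop]
        rw [if_neg (by exact_mod_cast hdm)]
      rw [hstep]
      simp only [pvFinish]
      push_neg at hdm
      rw [pvFacN_stop mm d hd hm hnd (by nlinarith)]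
      by_cases h2 : 2 ≤ mm
      · rw [if_pos (by exact_mod_cast (by omega : (1 : Int) < (mm : Int))), if_pos h2]
        simp
      · rw [if_neg (by exact_mod_cast (by omega : ¬ (1 : Int) < (mm : Int))), if_neg h2]
        simp

theorem pvFactorize_eq (m : Nat) (hm : 2 ≤ m) :
    pvFactorize (m : Int) = (pvFacN m).map (fun pe : Nat × Nat => ((pe.1 : Int), (pe.2 : Int))) := by
  have hna : ((m : Int)).natAbs = m := Int.natAbs_natCast _
  have h2 : ((2 : Nat) : Int) = (2 : Int) := by norm_num
  have h := pvFacLoop_eq m 2 m [] le_rfl (by omega) (by omega) (by nlinarith)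
  rw [h2] at h
  calc pvFactorize (m : Int) = pvFinish (pvFacLoop ((m : Int)).natAbs 2 (m : Int) []) := rfl
    _ = pvFinish (pvFacLoop m 2 (m : Int) []) := by rw [hna]
    _ = [] ++ (pvFacN m).map (fun pe : Nat × Nat => ((pe.1 : Int), (pe.2 : Int))) := h
    _ = _ := by simp

theorem pvLegLoop_eq (fuel : Nat) : ∀ (X p j0 : Nat), 2 ≤ p → 1 ≤ j0 → X < p ^ (j0 + fuel) →
    pvLegLoop fuel (X : Int) (p : Int) ((p : Int) ^ j0)
      = ((∑ j ∈ Finset.Ico j0 (j0 + fuel), X / p ^ j : Nat) : Int) := by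
  induction fuel with
  | zero => intro X p j0 _ _ _; simp [pvLegLoop]
  | succ fuel ih =>
    intro X p j0 hp hj hX
    simp only [pvLegLoop]
    by_cases hle : p ^ j0 ≤ X
    · rw [if_pos (by exact_mod_cast hle)]
      have hfd : PySem.Int.floordiv (X : Int) ((p : Int) ^ j0) = ((X / p ^ j0 : Nat) : Int) := by
        rw [show ((p : Int) ^ j0) = ((p ^ j0 : Nat) : Int) by push_cast; ring]
        rw [PySem.Int.floordiv_eq_ediv_of_pos (by positivity)]
        exact_mod_cast (Int.natCast_div X (p ^ j0)).symm
      have hq : (p : Int) ^ j0 * (p : Int) = (p : Int) ^ (j0 + 1) := (pow_succ _ _).symm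
      have hX' : X < p ^ (j0 + 1 + fuel) := by
        have : j0 + 1 + fuel = j0 + (fuel + 1) := by omega
        rw [this]
        exact hX
      rw [hfd, hq, ih X p (j0 + 1) hp (by omega) hX']
      rw [Finset.sum_eq_sum_Ico_succ_bot (by omega : j0 < j0 + (fuel + 1))]
      have hidx : j0 + 1 + fuel = j0 + (fuel + 1) := by omega
      rw [hidx]
      push_cast; ring
    · rw [if_neg (by exact_mod_cast hle)]
      have : ∑ j ∈ Finset.Ico j0 (j0 + (fuel + 1)), X / p ^ j = 0 := by
        refine Finset.sum_eq_zero ?_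
        intro j hjm
        simp only [Finset.mem_Ico] at hjm
        refine Nat.div_eq_of_lt ?_
        calc X < p ^ j0 := by omega
          _ ≤ p ^ j := Nat.pow_le_pow_right (by omega) hjm.1
      rw [this]
      rfl

theorem pvLegendre_eq_FFN (x : Int) (p : Nat) (hp : 2 ≤ p) :
    pvLegendre x (p : Int) = pvFactorialFactorNum_ x (p : Int) := by
  by_cases hx : 0 ≤ x
  · obtain ⟨X, rfl⟩ : ∃ X : Nat, (X : Int) = x := ⟨x.toNat, Int.toNat_of_nonneg hx⟩
    unfold pvLegendre
    rw [Int.toNat_natCast]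
    have hbound : X < p ^ (1 + (X + 1)) := by
      calc X < 2 ^ (1 + (X + 1)) := by
            calc X < 2 ^ X := Nat.lt_two_pow_self
              _ ≤ 2 ^ (1 + (X + 1)) := Nat.pow_le_pow_right (by omega) (by omega)
        _ ≤ p ^ (1 + (X + 1)) := Nat.pow_le_pow_left (by omega) _
    have hleg := pvLegLoop_eq (X + 1) X p 1 hp (by omega) hbound
    rw [pow_one] at hleg
    rw [hleg, pvFFN_eq_sum X p hp, pvLegendreIdentity X p (1 + (X + 1)) hp hbound]
  · push_neg at hx
    unfold pvLegendre
    have ht : x.toNat = 0 := Int.toNat_of_nonpos (by omega)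
    rw [ht]
    simp only [pvLegLoop]
    rw [if_neg (by
      have : (2 : Int) ≤ (p : Int) := by exact_mod_cast hp
      omega)]
    rw [pvFFN_nonpos x _ (by omega)]

-- ---- factorisation bridge ----

theorem pvMem_listFac_dvd : ∀ (n : Nat) {q : Nat}, q ∈ pvListFac n → q ∣ n ∧ 2 ≤ q := by
  intro n
  induction n using Nat.strong_induction_on with
  | _ n ih =>
    intro q hq
    rw [pvListFac] at hq
    by_cases h2 : 2 ≤ n
    · rw [dif_pos h2] at hq
      have hp2 : 2 ≤ n.minFac := (Nat.minFac_prime (by omega)).two_le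
      rcases List.mem_cons.1 hq with rfl | hmem
      · exact ⟨n.minFac_dvd, hp2⟩
      · have hlt : n / n.minFac < n := Nat.div_lt_self (by omega) (by omega)
        obtain ⟨hdvd, hge⟩ := ih _ hlt hmem
        exact ⟨hdvd.trans (Nat.div_dvd_of_dvd n.minFac_dvd), hge⟩
    · rw [dif_neg h2] at hq
      simp at hq

theorem pvListFac_group : ∀ (n : Nat), 2 ≤ n →
    pvListFac n
      = List.replicate (pvNu n n.minFac) n.minFac ++ pvListFac (n / n.minFac ^ pvNu n n.minFac) := by
  intro n
  induction n using Nat.strong_induction_on with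
  | _ n ih =>
    intro h
    have hp2 : 2 ≤ n.minFac := (Nat.minFac_prime (by omega)).two_le
    have hpd : n.minFac ∣ n := n.minFac_dvd
    have hnu : pvNu n n.minFac = pvNu (n / n.minFac) n.minFac + 1 := by
      rw [pvNu, dif_pos ⟨hp2, hpd, by omega⟩]
    have hl : pvListFac n = n.minFac :: pvListFac (n / n.minFac) := by
      rw [pvListFac]
      rw [dif_pos h]
    have hdd : ∀ c : Nat, n / n.minFac / n.minFac ^ c = n / n.minFac ^ (c + 1) := by
      intro c
      rw [Nat.div_div_eq_div_mul, ← pow_succ']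
    by_cases hq : n.minFac ∣ n / n.minFac
    · have hq1 : 1 ≤ n / n.minFac := Nat.div_pos (Nat.le_of_dvd (by omega) hpd) (by omega)
      have h2q : 2 ≤ n / n.minFac := le_trans hp2 (Nat.le_of_dvd (by omega) hq)
      have hmfq : (n / n.minFac).minFac = n.minFac := by
        refine le_antisymm (Nat.minFac_le_of_dvd hp2 hq) ?_
        exact Nat.minFac_le_of_dvd
          ((Nat.minFac_prime (by omega : n / n.minFac ≠ 1)).two_le)
          ((n / n.minFac).minFac_dvd.trans (Nat.div_dvd_of_dvd hpd))
      have hlt : n / n.minFac < n := Nat.div_lt_self (by omega) (by omega)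
      have hIH := ih _ hlt h2q
      rw [hmfq] at hIH
      rw [hl, hIH, hnu, hdd]
      simp [List.replicate_succ]
    · have hnu0 : pvNu (n / n.minFac) n.minFac = 0 := by
        rw [pvNu, dif_neg (by tauto)]
      rw [hl, hnu, hnu0]
      simp [pow_one]

theorem pvFoldlAdd_cons (rest : List Nat) : ∀ (s : List Nat) (p : Nat), p ∉ rest →
    rest.foldl PySem.Set.add (p :: s) = p :: rest.foldl PySem.Set.add s := by
  induction rest with
  | nil => intro s p _; rfl
  | cons x rest ih =>
    intro s p hp
    have hxp : ¬ (x == p) := by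
      simp only [beq_iff_eq]
      intro he
      exact hp (by simp [he])
    simp only [List.foldl_cons]
    have hadd : PySem.Set.add (p :: s) x = p :: PySem.Set.add s x := by
      simp only [PySem.Set.add, PySem.Set.contains, List.contains_cons, hxp, Bool.false_or]
      split_ifs <;> rfl
    rw [hadd, ih _ p (fun hm => hp (List.mem_cons_of_mem _ hm))]

theorem pvFoldlAdd_self (p : Nat) : ∀ (c : Nat), (List.replicate c p).foldl PySem.Set.add [p] = [p] := by
  intro c
  induction c with
  | zero => rfl
  | succ c ih =>
    rw [List.replicate_succ, List.foldl_cons]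
    have hadd : PySem.Set.add [p] p = [p] := by
      simp [PySem.Set.add, PySem.Set.contains]
    rw [hadd, ih]

theorem pvOfList_replicate (ν p : Nat) (rest : List Nat) (hν : 1 ≤ ν) (hp : p ∉ rest) :
    PySem.Set.ofList (List.replicate ν p ++ rest) = p :: PySem.Set.ofList rest := by
  rw [PySem.Set.ofList_eq_foldl, PySem.Set.ofList_eq_foldl, List.foldl_append]
  have hrep : (List.replicate ν p).foldl PySem.Set.add [] = [p] := by
    obtain ⟨c, rfl⟩ : ∃ c, ν = c + 1 := ⟨ν - 1, by omega⟩
    rw [List.replicate_succ, List.foldl_cons]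
    have hadd : PySem.Set.add [] p = [p] := by
      simp [PySem.Set.add, PySem.Set.contains]
    rw [hadd, pvFoldlAdd_self]
  rw [hrep]
  exact pvFoldlAdd_cons rest [] p hp

theorem pvFacN_eq_group : ∀ (n : Nat),
    pvFacN n = (PySem.Set.ofList (pvListFac n)).map (fun p => (p, (pvListFac n).count p)) := by
  intro n
  induction n using Nat.strong_induction_on with
  | _ n ih =>
    by_cases h2 : 2 ≤ n
    · have hp2 : 2 ≤ n.minFac := (Nat.minFac_prime (by omega)).two_le
      have hpd : n.minFac ∣ n := n.minFac_dvd
      have hν1 : 1 ≤ pvNu n n.minFac := (pvNu_le_iff hp2 (by omega) 1).1 (by simpa using hpd)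
      have hdvdpow : n.minFac ^ pvNu n n.minFac ∣ n := (pvNu_dvd hp2 n (by omega)).1
      have hlt : n / n.minFac ^ pvNu n n.minFac < n := by
        refine Nat.div_lt_self (by omega) ?_
        calc 1 < 2 := by omega
          _ ≤ n.minFac ^ 1 := by simpa using hp2
          _ ≤ n.minFac ^ pvNu n n.minFac := Nat.pow_le_pow_right (by omega) hν1
      have hgroup := pvListFac_group n h2
      have hpnot : n.minFac ∉ pvListFac (n / n.minFac ^ pvNu n n.minFac) := by
        intro hmem
        obtain ⟨hdvd', -⟩ := pvMem_listFac_dvd _ hmem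
        refine (pvNu_dvd hp2 n (by omega)).2 ?_
        have h1 : n.minFac ^ pvNu n n.minFac * n.minFac
            ∣ n.minFac ^ pvNu n n.minFac * (n / n.minFac ^ pvNu n n.minFac) :=
          mul_dvd_mul_left _ hdvd'
        rw [Nat.mul_div_cancel' hdvdpow] at h1
        calc n.minFac ^ (pvNu n n.minFac + 1) = n.minFac ^ pvNu n n.minFac * n.minFac := by ring
          _ ∣ n := h1
      have hofl : PySem.Set.ofList (pvListFac n)
          = n.minFac :: PySem.Set.ofList (pvListFac (n / n.minFac ^ pvNu n n.minFac)) := by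
        rw [hgroup]
        exact pvOfList_replicate _ _ _ hν1 hpnot
      rw [pvFacN, dif_pos h2, ih _ hlt, hofl, List.map_cons]
      congr 1
      · rw [hgroup]
        simp [List.count_append, List.count_replicate, List.count_eq_zero_of_not_mem hpnot]
      · refine List.map_congr_left ?_
        intro q hq
        have hqmem : q ∈ pvListFac (n / n.minFac ^ pvNu n n.minFac) :=
          (PySem.Set.mem_ofList _ _).1 hq
        have hqp : ¬ (n.minFac == q) := by
          simp only [beq_iff_eq]
          intro he
          exact hpnot (he ▸ hqmem)
        rw [hgroup]
        simp [List.count_append, List.count_replicate, hqp]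
    · rw [pvFacN, dif_neg h2]
      rw [show pvListFac n = [] from by rw [pvListFac]; rw [dif_neg h2]]
      rfl

theorem pvFoldlAdd_map (xs : List Nat) : ∀ (s : List Nat),
    (xs.map (fun q : Nat => (q : Int))).foldl PySem.Set.add (s.map (fun q : Nat => (q : Int)))
      = (xs.foldl PySem.Set.add s).map (fun q : Nat => (q : Int)) := by
  induction xs with
  | nil => intro s; rfl
  | cons x xs ih =>
    intro s
    simp only [List.map_cons, List.foldl_cons]
    have hc : (s.map (fun q : Nat => (q : Int))).contains ((x : Nat) : Int) = s.contains x := by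
      by_cases hm : x ∈ s
      · simp only [List.contains_eq_mem]
        simp [List.mem_map, hm]
      · simp only [List.contains_eq_mem]
        simp only [List.mem_map]
        have h1 : ¬ ∃ a ∈ s, (a : Int) = (x : Int) := by
          rintro ⟨a, ha, hax⟩
          exact hm (by rwa [show a = x from by exact_mod_cast hax] at ha)
        simp [hm, h1]
    have hadd : PySem.Set.add (s.map (fun q : Nat => (q : Int))) ((x : Nat) : Int)
        = (PySem.Set.add s x).map (fun q : Nat => (q : Int)) := by
      simp only [PySem.Set.add, PySem.Set.contains, hc]
      split_ifs with hmm2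
      · rfl
      · simp
    rw [hadd, ih _]

theorem pvOfList_map_cast (xs : List Nat) :
    PySem.Set.ofList (xs.map (fun q : Nat => (q : Int))) = (PySem.Set.ofList xs).map (fun q : Nat => (q : Int)) := by
  rw [PySem.Set.ofList_eq_foldl, PySem.Set.ofList_eq_foldl]
  simpa using pvFoldlAdd_map xs []

-- ---- dict plumbing ----

theorem pvInsertFold_items (ks : List Int) (f : Int → Int) (hk : ks.Nodup) :
    (ks.foldl (fun d k => d.insert k (f k)) PySem.Dict.empty).items = ks.map (fun k => (k, f k)) := by
  have h := PySem.Dict.items_foldl_insert_fresh ks (fun a => a) f PySem.Dict.empty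
    (fun a _ => by simp) (by simpa using hk)
  simpa using h

theorem pvInsertFold_keys (ks : List Int) (f : Int → Int) (hk : ks.Nodup) :
    (ks.foldl (fun d k => d.insert k (f k)) PySem.Dict.empty).keys = ks := by
  simp only [PySem.Dict.keys]
  rw [pvInsertFold_items ks f hk]
  simp [Function.comp_def]

theorem pvInsertFold_getD (ks : List Int) (f : Int → Int) (hk : ks.Nodup)
    {key : Int} (hmem : key ∈ ks) :
    (ks.foldl (fun d k => d.insert k (f k)) PySem.Dict.empty).getD key 0 = f key := by
  have hitems := pvInsertFold_items ks f hk
  have hkeys : (ks.foldl (fun d k => d.insert k (f k)) PySem.Dict.empty).keys.Nodup := by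
    rw [pvInsertFold_keys ks f hk]
    exact hk
  exact PySem.Dict.getD_of_mem_items _ (by
    rw [hitems]
    exact List.mem_map_of_mem hmem) hkeys 0

-- ---- main equality ----

def pvMinOr0 (l : List Int) : Int :=
  match PySem.List.min? l (fun x => x) with
  | some v => v
  | none => 0

theorem pvComb_eq (n k : Int) (M : Nat) (hm : 2 ≤ M) :
    comb_factor_num n k (M : Int) = comb_factor_num_alt n k (M : Int) := by
  set LF := pvListFac M with hLF
  set LFI := LF.map (fun q : Nat => (q : Int)) with hLFI
  have hpf : pvGetPrimeFactor (M : Int) = PySem.Dict.counter LFI := pvGetPrimeFactor_eq M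
  have hnodup : (PySem.Dict.counter LFI).keys.Nodup := PySem.Dict.nodup_keys_counter _
  have hFF : ∀ (x key : Int), key ∈ (PySem.Dict.counter LFI).keys →
      (pvFactorialFactorNum x (M : Int)).getD key 0 = pvFactorialFactorNum_ x key := by
    intro x key hkmem
    show ((pvGetPrimeFactor (M : Int)).keys.foldl
        (fun d key => d.insert key (pvFactorialFactorNum_ x key)) PySem.Dict.empty).getD key 0
      = pvFactorialFactorNum_ x key
    rw [hpf]
    exact pvInsertFold_getD _ _ hnodup hkmem
  have hkeys01 : (pvFactorialFactorNum n (M : Int)).keys = (PySem.Dict.counter LFI).keys := by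
    show ((pvGetPrimeFactor (M : Int)).keys.foldl
        (fun d key => d.insert key (pvFactorialFactorNum_ n key)) PySem.Dict.empty).keys = _
    rw [hpf]
    exact pvInsertFold_keys _ _ hnodup
  set pD := (pvFactorialFactorNum n (M : Int)).keys.foldl
      (fun d key => d.insert key
        ((pvFactorialFactorNum n (M : Int)).getD key 0
          - (pvFactorialFactorNum k (M : Int)).getD key 0
          - (pvFactorialFactorNum (n - k) (M : Int)).getD key 0)) PySem.Dict.empty with hpD
  have hPgetD : ∀ key ∈ (PySem.Dict.counter LFI).keys, pD.getD key 0
      = pvFactorialFactorNum_ n key - pvFactorialFactorNum_ k key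
        - pvFactorialFactorNum_ (n - k) key := by
    intro key hkmem
    rw [hpD, hkeys01, pvInsertFold_getD _ _ hnodup hkmem]
    rw [hFF n key hkmem, hFF k key hkmem, hFF (n - k) key hkmem]
  have hA : comb_factor_num n k (M : Int)
      = pvMinOr0 ((pvGetPrimeFactor (M : Int)).keys.map
          (fun key => PySem.Int.truncdiv (pD.getD key 0) ((pvGetPrimeFactor (M : Int)).getD key 0))) := rfl
  have hB : comb_factor_num_alt n k (M : Int)
      = pvMinOr0 ((pvFactorize (M : Int)).map (fun pe =>
          PySem.Int.truncdiv
            (pvLegendre n pe.1 - pvLegendre k pe.1 - pvLegendre (n - k) pe.1) pe.2)) := rfl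
  rw [hA, hB, hpf, pvFactorize_eq M hm, pvFacN_eq_group M, PySem.Dict.keys_counter]
  rw [hLFI, pvOfList_map_cast]
  simp only [List.map_map]
  congr 1
  refine List.map_congr_left ?_
  intro q hq
  have hqLF : q ∈ LF := (PySem.Set.mem_ofList _ _).1 hq
  have hq2 : 2 ≤ q := (pvMem_listFac_dvd M (hLF ▸ hqLF)).2
  have hkmem : ((q : Nat) : Int) ∈ (PySem.Dict.counter LFI).keys := by
    rw [PySem.Dict.keys_counter]
    exact (PySem.Set.mem_ofList _ _).2 (by
      rw [hLFI]
      exact List.mem_map_of_mem hqLF)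
  simp only [Function.comp_apply]
  rw [hPgetD _ hkmem, PySem.Dict.getD_counter]
  rw [List.count_map_of_injective LF (fun q : Nat => (q : Int))
    (fun a b hab => by simpa using hab) q]
  rw [pvLegendre_eq_FFN n q hq2, pvLegendre_eq_FFN k q hq2, pvLegendre_eq_FFN (n - k) q hq2]

-- ===== VERDICT (by name: the statement is the Claim_ definition above) =====
theorem comb_factor_num_spec : Claim_equal_comb_factor_num := by
  intro n k m _ hpre
  unfold Spec_comb_factor_num
  have hpre' : (2 : Int) ≤ m := hpre
  obtain ⟨M, rfl⟩ : ∃ M : Nat, (M : Int) = m := ⟨m.toNat, Int.toNat_of_nonneg (by omega)⟩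
  exact pvComb_eq n k M (by exact_mod_cast hpre')
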